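-- pv_equiv track=rewrite | github.com/ChengzhangBai/CST8279 | LAB10/bitmap.py | hex2bin
-- ===== SOURCE A (Python) =====
-- def hex2bin(hexValue):
--     hexValueList = list(hexValue[2:])#ignore the first two letters 0x
--     binValueList = []
--     for i in hexValueList:
--         binValue = bin(int(i, 16))[2:].zfill(4) #delete the first two letters 0b
--         binValueList.append(binValue)
--     binValue = ''.join(binValueList)
--     return binValue
-- ===== SOURCE B (Python) =====
-- def hex2bin(hexValue):
--     s = hexValue[2:]
--     if not s:
--         return ''
--     n = 0
--     for c in s:
--         n = n * 16 + int(c, 16)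
--     return format(n, 'b').zfill(4 * len(s))
-- ===== Notes on version B (the rewrite author's own statement) =====
-- stated objective: alternative
-- what changed: Instead of converting each hex digit to a 4-bit string and joining the chunks, B accumulates the whole value as a single integer (n = n*16 + digit) and emits it once with format(n,'b') zero-filled to 4 bits per digit.
import Mathlib
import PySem

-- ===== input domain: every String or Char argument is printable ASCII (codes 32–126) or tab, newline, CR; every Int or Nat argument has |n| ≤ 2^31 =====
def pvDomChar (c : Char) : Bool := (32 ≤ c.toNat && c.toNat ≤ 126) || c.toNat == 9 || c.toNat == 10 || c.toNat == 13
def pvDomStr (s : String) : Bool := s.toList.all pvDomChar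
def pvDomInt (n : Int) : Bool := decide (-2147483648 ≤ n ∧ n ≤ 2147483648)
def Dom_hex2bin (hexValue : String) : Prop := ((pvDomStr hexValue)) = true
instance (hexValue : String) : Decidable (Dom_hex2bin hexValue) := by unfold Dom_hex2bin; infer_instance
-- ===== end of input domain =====

-- B replaces A's per-digit 4-bit chunk concatenation by accumulating one integer and formatting
-- it once (alternative algorithm, same observable behaviour; not claimed faster).

-- ===== PORT A =====
-- bin(int(i, 16))[2:].zfill(4) for a one-char string i; the none branch is int()'s ValueError,
-- unreachable under Pre_hex2bin
def hexChunkA (i : Char) : List Char :=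
  match PySem.Int.ofCharsBase? [i] 16 with
  | some v => PySem.Chars.zfill (PySem.Chars.slice (PySem.Int.toBinChars0b v) (some 2) none) 4
  | none => []

def hex2bin (hexValue : String) : String :=
  let hexValueList := PySem.Chars.slice hexValue.toList (some 2) none
  let binValueList := hexValueList.foldl (fun acc i => acc ++ [hexChunkA i]) ([] : List (List Char))
  String.ofList (PySem.Chars.join [] binValueList)

-- ===== PORT B =====
-- n = n * 16 + int(c, 16); the .getD 0 marks int()'s ValueError, unreachable under Pre_hex2bin
def hex2bin_alt (hexValue : String) : String :=
  let s := PySem.Chars.slice hexValue.toList (some 2) none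
  if s = [] then ""
  else
    let n := s.foldl (fun n c => n * 16 + (PySem.Int.ofCharsBase? [c] 16).getD 0) (0 : Int)
    String.ofList (PySem.Chars.zfill (PySem.Int.toBinChars n) (4 * PySem.List.len s))

-- ===== PRECONDITION & SPEC =====
def hexDigitChars : List Char :=
  ['0','1','2','3','4','5','6','7','8','9','a','b','c','d','e','f','A','B','C','D','E','F']

-- Pre_ excludes exactly the inputs on which A raises ValueError: some character after the
-- first two is not a hexadecimal digit, so int(i, 16) fails on it.
def Pre_hex2bin (hexValue : String) : Prop :=
  ∀ c ∈ hexValue.toList.drop 2, c ∈ hexDigitChars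
instance (hexValue : String) : Decidable (Pre_hex2bin hexValue) :=
  List.decidableBAll _ _

def pvWitness_hex2bin : String := "0x1aF"

def Spec_hex2bin (hexValue : String) (out : String) : Prop := out = hex2bin_alt hexValue
instance (hexValue : String) (out : String) : Decidable (Spec_hex2bin hexValue out) := by
  unfold Spec_hex2bin; infer_instance

-- ===== CLAIM (what is proved, stated in full; the proofs are below) =====
def Claim_equal_hex2bin : Prop := ∀ (hexValue : String), Dom_hex2bin hexValue → Pre_hex2bin hexValue → Spec_hex2bin hexValue (hex2bin hexValue)

-- ===== LEMMAS AND PROOFS =====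

-- value of one hex digit
def hexValN (c : Char) : ℕ :=
  if c.toNat ≤ 57 then c.toNat - 48 else if c.toNat ≤ 70 then c.toNat - 55 else c.toNat - 87

-- binary representation of n truncated/zero-filled to exactly w bits, most significant first
def fixedBits : ℕ → ℕ → List Char
  | 0, _ => []
  | w + 1, n => fixedBits w (n / 2) ++ [Nat.digitChar (n % 2)]

theorem hexfacts : ∀ c ∈ hexDigitChars,
    PySem.Int.ofCharsBase? [c] 16 = some ((hexValN c : ℤ)) ∧ hexValN c < 16 ∧
    hexChunkA c = fixedBits 4 (hexValN c) := by
  intro c hc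
  fin_cases hc <;> exact ⟨rfl, by decide, rfl⟩

theorem tdc_acc : ∀ (f n : ℕ) (ds : List Char),
    Nat.toDigitsCore 2 f n ds = Nat.toDigitsCore 2 f n [] ++ ds := by
  intro f
  induction f with
  | zero => intro n ds; simp [Nat.toDigitsCore]
  | succ f ih =>
    intro n ds
    simp only [Nat.toDigitsCore]
    by_cases h : n / 2 = 0
    · simp [h]
    · simp only [h, if_false]
      rw [ih (n / 2) [Nat.digitChar (n % 2)], ih (n / 2) (Nat.digitChar (n % 2) :: ds)]
      simp

theorem tdc_fuel : ∀ (f₁ f₂ n : ℕ) (ds : List Char), n < f₁ → n < f₂ →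
    Nat.toDigitsCore 2 f₁ n ds = Nat.toDigitsCore 2 f₂ n ds := by
  intro f₁
  induction f₁ with
  | zero => intro f₂ n ds h1 _; omega
  | succ f ih =>
    intro f₂ n ds h1 h2
    obtain ⟨g, rfl⟩ : ∃ g, f₂ = g + 1 := ⟨f₂ - 1, by omega⟩
    simp only [Nat.toDigitsCore]
    by_cases h : n / 2 = 0
    · simp [h]
    · simp only [h, if_false]
      exact ih g (n / 2) _ (by omega) (by omega)

theorem toDigits_two_rec (n : ℕ) (h : 2 ≤ n) :
    Nat.toDigits 2 n = Nat.toDigits 2 (n / 2) ++ [Nat.digitChar (n % 2)] := by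
  unfold Nat.toDigits
  conv_lhs => rw [Nat.toDigitsCore]
  have h' : n / 2 ≠ 0 := by omega
  simp only [h', if_false]
  rw [tdc_acc, tdc_fuel n (n / 2 + 1) (n / 2) [] (by omega) (by omega)]

theorem toDigits_two_small (n : ℕ) (h : n < 2) :
    Nat.toDigits 2 n = [Nat.digitChar n] := by
  interval_cases n <;> rfl

theorem toDigits_two_chars (n : ℕ) : ∀ c ∈ Nat.toDigits 2 n, c = '0' ∨ c = '1' := by
  induction n using Nat.strong_induction_on with
  | _ n ih =>
    by_cases h : n < 2
    · rw [toDigits_two_small n h]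
      clear ih
      rcases (show n = 0 ∨ n = 1 from by omega) with rfl | rfl <;>
        · intro c hc
          simp only [List.mem_singleton] at hc
          subst hc
          first
          | exact Or.inl rfl
          | exact Or.inr rfl
    · rw [toDigits_two_rec n (by omega)]
      intro c hc
      rcases List.mem_append.mp hc with hc | hc
      · exact ih (n / 2) (by omega) c hc
      · simp only [List.mem_singleton] at hc
        subst hc
        have : n % 2 = 0 ∨ n % 2 = 1 := by omega
        rcases this with h2 | h2 <;> rw [h2] <;> simp [Nat.digitChar]

theorem toDigits_two_ne_nil (n : ℕ) : Nat.toDigits 2 n ≠ [] := by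
  by_cases h : n < 2
  · rw [toDigits_two_small n h]; simp
  · rw [toDigits_two_rec n (by omega)]; simp

theorem fixedBits_zero : ∀ w, fixedBits w 0 = List.replicate w '0' := by
  intro w
  induction w with
  | zero => rfl
  | succ w ih =>
    show fixedBits w (0 / 2) ++ [Nat.digitChar (0 % 2)] = _
    rw [Nat.zero_div, ih]
    simp [List.replicate_succ', Nat.digitChar]

theorem padBin : ∀ (w n : ℕ), n < 2 ^ w → 1 ≤ w →
    List.replicate (w - (Nat.toDigits 2 n).length) '0' ++ Nat.toDigits 2 n = fixedBits w n := by
  intro w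
  induction w with
  | zero => intro n _ hw; omega
  | succ w ih =>
    intro n hn _
    by_cases h : n < 2
    · rw [toDigits_two_small n h]
      show _ = fixedBits w (n / 2) ++ [Nat.digitChar (n % 2)]
      have h2 : n / 2 = 0 := by omega
      have h3 : n % 2 = n := by omega
      rw [h2, h3, fixedBits_zero]
      simp
    · have hw : 1 ≤ w := by
        by_contra hw
        have : w = 0 := by omega
        subst this; omega
      have hdiv : n / 2 < 2 ^ w := by
        have : (2 : ℕ) ^ (w + 1) = 2 * 2 ^ w := by ring
        omega
      rw [toDigits_two_rec n (by omega)]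
      show _ = fixedBits w (n / 2) ++ [Nat.digitChar (n % 2)]
      rw [← ih (n / 2) hdiv hw]
      have hlen : (Nat.toDigits 2 (n / 2)).length + 1 ≤ w + 1 := by
        have := Nat.toDigits_length 2 (n / 2) w (by omega) hdiv
        omega
      simp only [List.length_append, List.length_singleton]
      rw [show w + 1 - ((Nat.toDigits 2 (n / 2)).length + 1)
            = w - (Nat.toDigits 2 (n / 2)).length from by omega]
      simp

theorem zfill_eq_pad (cs : List Char) (w : ℕ) (hne : cs ≠ [])
    (hc : ∀ c ∈ cs, c = '0' ∨ c = '1') :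
    PySem.Chars.zfill cs (w : ℤ) = List.replicate (w - cs.length) '0' ++ cs := by
  unfold PySem.Chars.zfill
  by_cases h : (w : ℤ) ≤ (cs.length : ℤ)
  · rw [if_pos h, show w - cs.length = 0 from by omega]
    simp
  · rw [if_neg h]
    match cs, hne with
    | c :: rest, _ =>
      have hc' : c = '0' ∨ c = '1' := hc c (List.mem_cons_self)
      have hpm : ¬(c = '+' ∨ c = '-') := by rcases hc' with h | h <;> subst h <;> decide
      simp [hpm, Int.toNat_natCast]

theorem fixedBits_chunk (w v d : ℕ) (hd : d < 16) :
    fixedBits (w + 4) (16 * v + d) = fixedBits w v ++ fixedBits 4 d := by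
  rw [show w + 4 = w + 1 + 1 + 1 + 1 from by omega,
      show (4 : ℕ) = 0 + 1 + 1 + 1 + 1 from by omega]
  simp only [fixedBits]
  have e4 : (16 * v + d) / 2 / 2 / 2 / 2 = v := by omega
  have e3 : (16 * v + d) / 2 / 2 / 2 % 2 = d / 2 / 2 / 2 % 2 := by omega
  have e2 : (16 * v + d) / 2 / 2 % 2 = d / 2 / 2 % 2 := by omega
  have e1 : (16 * v + d) / 2 % 2 = d / 2 % 2 := by omega
  have e0 : (16 * v + d) % 2 = d % 2 := by omega
  rw [e4, e3, e2, e1, e0]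
  simp

-- the accumulated numeric value of a hex-digit string
def valN (cs : List Char) : ℕ := cs.foldl (fun a c => 16 * a + hexValN c) 0

theorem structural : ∀ (cs : List Char), (∀ c ∈ cs, hexValN c < 16) →
    fixedBits (4 * cs.length) (valN cs) = (cs.map (fun c => fixedBits 4 (hexValN c))).flatten := by
  intro cs
  induction cs using List.reverseRecOn with
  | nil => intro _; rfl
  | append_singleton cs c ih =>
    intro h
    have hc : hexValN c < 16 := h c (by simp)
    have hcs : ∀ c' ∈ cs, hexValN c' < 16 := fun c' hc' => h c' (by simp [hc'])
    have hval : valN (cs ++ [c]) = 16 * valN cs + hexValN c := by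
      unfold valN; rw [List.foldl_append]; rfl
    rw [hval, List.length_append, List.length_singleton,
        show 4 * (cs.length + 1) = 4 * cs.length + 4 from by ring,
        fixedBits_chunk _ _ _ hc, ih hcs]
    simp

theorem valN_lt : ∀ (cs : List Char), (∀ c ∈ cs, hexValN c < 16) →
    valN cs < 16 ^ cs.length := by
  intro cs
  induction cs using List.reverseRecOn with
  | nil => intro _; simp [valN]
  | append_singleton cs c ih =>
    intro h
    have hc : hexValN c < 16 := h c (by simp)
    have hcs := fun c' hc' => h c' (List.mem_append_left _ hc')
    have hval : valN (cs ++ [c]) = 16 * valN cs + hexValN c := by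
      unfold valN; rw [List.foldl_append]; rfl
    have := ih hcs
    rw [hval, List.length_append, List.length_singleton, pow_succ]
    nlinarith

theorem foldInt : ∀ (cs : List Char), (∀ c ∈ cs, c ∈ hexDigitChars) → ∀ (a : ℕ),
    cs.foldl (fun n c => n * 16 + (PySem.Int.ofCharsBase? [c] 16).getD 0) ((a : ℕ) : ℤ)
      = ((cs.foldl (fun a c => 16 * a + hexValN c) a : ℕ) : ℤ) := by
  intro cs
  induction cs with
  | nil => intro _ a; rfl
  | cons c cs ih =>
    intro h a
    have hc := hexfacts c (h c List.mem_cons_self)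
    simp only [List.foldl_cons, hc.1, Option.getD_some]
    rw [show (a : ℤ) * 16 + (hexValN c : ℤ) = ((16 * a + hexValN c : ℕ) : ℤ) from by push_cast; ring]
    exact ih (fun c' hc' => h c' (List.mem_cons_of_mem _ hc')) _

theorem joinNil_flatten (xss : List (List Char)) :
    PySem.Chars.join [] xss = xss.flatten := by
  unfold PySem.Chars.join
  induction xss with
  | nil => rfl
  | cons x r ih =>
    cases r with
    | nil => simp [List.intercalate]
    | cons y t =>
      simp only [List.intercalate, List.intersperse] at ih ⊢
      simp_all

theorem slice_two (xs : List Char) :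
    PySem.Chars.slice xs (some 2) none = xs.drop 2 := by
  unfold PySem.Chars.slice
  rw [PySem.List.slice_from xs (by norm_num : (0 : ℤ) ≤ 2)]
  rfl

theorem hex2bin_chars (hexValue : String) :
    hex2bin hexValue
      = String.ofList (((hexValue.toList.drop 2).map hexChunkA).flatten) := by
  unfold hex2bin
  simp only [slice_two, PySem.List.foldl_append_singleton_eq_map, List.nil_append,
    joinNil_flatten]

-- ===== VERDICT (by name: the statement is the Claim_ definition above) =====
theorem hex2bin_spec : Claim_equal_hex2bin := by
  intro hexValue _ hpre
  unfold Spec_hex2bin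
  rw [hex2bin_chars hexValue]
  unfold hex2bin_alt
  rw [slice_two]
  set cs := hexValue.toList.drop 2 with hcs
  by_cases hnil : cs = []
  · rw [if_pos hnil, hnil]
    rfl
  · rw [if_neg hnil]
    have hx : ∀ c ∈ cs, c ∈ hexDigitChars := hpre
    have hlt : ∀ c ∈ cs, hexValN c < 16 := fun c hc => (hexfacts c (hx c hc)).2.1
    have hfold := foldInt cs hx 0
    simp only [Nat.cast_zero] at hfold
    rw [hfold]
    have hnn : PySem.Int.toBinChars ((valN cs : ℕ) : ℤ) = Nat.toDigits 2 (valN cs) := by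
      unfold PySem.Int.toBinChars
      rw [if_neg (not_lt.mpr (Int.natCast_nonneg _)), Int.toNat_natCast]
    have hlen : (4 : ℤ) * PySem.List.len cs = ((4 * cs.length : ℕ) : ℤ) := by
      rw [PySem.List.len_eq]; push_cast; ring
    have hbound : valN cs < 2 ^ (4 * cs.length) := by
      have h1 := valN_lt cs hlt
      have h2 : (16 : ℕ) ^ cs.length = 2 ^ (4 * cs.length) := by
        rw [show (16 : ℕ) = 2 ^ 4 from rfl, ← pow_mul]
      omega
    have hw : 1 ≤ 4 * cs.length := by
      have : cs.length ≠ 0 := fun h => hnil (List.eq_nil_of_length_eq_zero h)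
      omega
    show String.ofList (List.map hexChunkA cs).flatten =
      String.ofList (PySem.Chars.zfill
        (PySem.Int.toBinChars ((List.foldl (fun a c => 16 * a + hexValN c) 0 cs : ℕ) : ℤ))
        (4 * PySem.List.len cs))
    rw [show List.foldl (fun a c => 16 * a + hexValN c) 0 cs = valN cs from rfl]
    rw [hnn, hlen,
        zfill_eq_pad _ _ (toDigits_two_ne_nil _) (toDigits_two_chars _),
        padBin _ _ hbound hw, structural cs hlt]
    congr 1
    congr 1
    exact List.map_congr_left (fun c hc => (hexfacts c (hx c hc)).2.2)
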